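-- pv_equiv track=rewrite | github.com/sahiltyagi4/ARTopk | flexible_compression/miscellaneous/helper.py | initialize_latency_bandwidth
-- ===== SOURCE A (Python) =====
-- def initialize_latency_bandwidth(model_name):
--     latency, bw = [], []
--     if model_name == 'resnet50':
--         totalepochs = 101
--         for i in range(0, totalepochs):
--             if 0 <= i < 8:
--                 latency.append(1)
--                 bw.append(25)
--             elif 8 <= i < 16:
--                 latency.append(2)
--                 bw.append(20)
--             elif 16 <= i < 24:
--                 latency.append(4)
--                 bw.append(15)
--             elif 24 <= i < 32:
--                 latency.append(8)
--                 bw.append(10)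
--             elif 32 <= i < 40:
--                 latency.append(16)
--                 bw.append(5)
--             elif 40 <= i < 48:
--                 latency.append(32)
--                 bw.append(1)
--             elif 48 <= i < 56:
--                 latency.append(32)
--                 bw.append(1)
--             elif 56 <= i < 64:
--                 latency.append(16)
--                 bw.append(5)
--             elif 64 <= i < 72:
--                 latency.append(8)
--                 bw.append(10)
--             elif 72 <= i < 80:
--                 latency.append(4)
--                 bw.append(15)
--             elif 80 <= i < 88:
--                 latency.append(2)
--                 bw.append(20)
--             elif 88 <= i < 96:
--                 latency.append(1)
--                 bw.append(25)
--             else: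
--                 latency.append(1)
--                 bw.append(25)
--     else:
--         # for resnet18, alexnet and vit
--         totalepochs = 51
--         for i in range(0, totalepochs):
--             if 0 <= i < 4:
--                 latency.append(1)
--                 bw.append(25)
--             elif 4 <= i < 8:
--                 latency.append(2)
--                 bw.append(20)
--             elif 8 <= i < 12:
--                 latency.append(4)
--                 bw.append(15)
--             elif 12 <= i < 16:
--                 latency.append(8)
--                 bw.append(10)
--             elif 16 <= i < 20:
--                 latency.append(16)
--                 bw.append(5)
--             elif 20 <= i < 24:
--                 latency.append(32)
--                 bw.append(1)
--             elif 24 <= i < 28: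
--                 latency.append(32)
--                 bw.append(1)
--             elif 28 <= i < 32:
--                 latency.append(16)
--                 bw.append(5)
--             elif 32 <= i < 36:
--                 latency.append(8)
--                 bw.append(10)
--             elif 36 <= i < 40:
--                 latency.append(4)
--                 bw.append(15)
--             elif 40 <= i < 44:
--                 latency.append(2)
--                 bw.append(20)
--             elif 44 <= i < 48:
--                 latency.append(1)
--                 bw.append(25)
--             else:
--                 latency.append(1)
--                 bw.append(25)
--
--     return latency, bw
-- ===== SOURCE B (Python) =====
-- def initialize_latency_bandwidth(model_name):
--     pat = [(1, 25), (2, 20), (4, 15), (8, 10), (16, 5), (32, 1),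
--            (32, 1), (16, 5), (8, 10), (4, 15), (2, 20), (1, 25)]
--     total, bs = (101, 8) if model_name == 'resnet50' else (51, 4)
--     latency, bw = [], []
--     for k, (l, b) in enumerate(pat):
--         n = bs if k < 11 else total - 11 * bs
--         latency += [l] * n
--         bw += [b] * n
--     return latency, bw
-- ===== Notes on version B (the rewrite author's own statement) =====
-- stated objective: simpler
-- what changed: Replaces the two hand-unrolled 13-branch per-epoch if/elif chains with one 12-entry (latency,bandwidth) pattern table expanded by repetition counts (blocksize per block, remainder folded into the last entry).
import Mathlib
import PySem

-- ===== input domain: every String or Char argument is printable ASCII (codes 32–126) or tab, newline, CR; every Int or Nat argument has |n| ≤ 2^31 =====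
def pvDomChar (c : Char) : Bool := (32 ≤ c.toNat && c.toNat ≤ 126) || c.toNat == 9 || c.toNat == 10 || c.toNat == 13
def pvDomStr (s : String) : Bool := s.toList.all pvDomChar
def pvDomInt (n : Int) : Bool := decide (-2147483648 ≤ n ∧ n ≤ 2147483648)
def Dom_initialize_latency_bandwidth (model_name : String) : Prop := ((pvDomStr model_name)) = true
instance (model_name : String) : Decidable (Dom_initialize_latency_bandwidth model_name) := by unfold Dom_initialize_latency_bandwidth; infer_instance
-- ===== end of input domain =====

-- B replaces the hand-unrolled per-epoch branch chains with a 12-entry pattern table expanded by repetition counts (simpler).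

-- ===== PORT A =====
def initialize_latency_bandwidth (model_name : String) : List Int × List Int :=
  if model_name == "resnet50" then
    (PySem.List.pyRange 0 101 1).foldl (fun (st : List Int × List Int) i =>
      if 0 ≤ i ∧ i < 8 then (st.1 ++ [1], st.2 ++ [25])
      else if 8 ≤ i ∧ i < 16 then (st.1 ++ [2], st.2 ++ [20])
      else if 16 ≤ i ∧ i < 24 then (st.1 ++ [4], st.2 ++ [15])
      else if 24 ≤ i ∧ i < 32 then (st.1 ++ [8], st.2 ++ [10])
      else if 32 ≤ i ∧ i < 40 then (st.1 ++ [16], st.2 ++ [5])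
      else if 40 ≤ i ∧ i < 48 then (st.1 ++ [32], st.2 ++ [1])
      else if 48 ≤ i ∧ i < 56 then (st.1 ++ [32], st.2 ++ [1])
      else if 56 ≤ i ∧ i < 64 then (st.1 ++ [16], st.2 ++ [5])
      else if 64 ≤ i ∧ i < 72 then (st.1 ++ [8], st.2 ++ [10])
      else if 72 ≤ i ∧ i < 80 then (st.1 ++ [4], st.2 ++ [15])
      else if 80 ≤ i ∧ i < 88 then (st.1 ++ [2], st.2 ++ [20])
      else if 88 ≤ i ∧ i < 96 then (st.1 ++ [1], st.2 ++ [25])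
      else (st.1 ++ [1], st.2 ++ [25])) ([], [])
  else
    (PySem.List.pyRange 0 51 1).foldl (fun (st : List Int × List Int) i =>
      if 0 ≤ i ∧ i < 4 then (st.1 ++ [1], st.2 ++ [25])
      else if 4 ≤ i ∧ i < 8 then (st.1 ++ [2], st.2 ++ [20])
      else if 8 ≤ i ∧ i < 12 then (st.1 ++ [4], st.2 ++ [15])
      else if 12 ≤ i ∧ i < 16 then (st.1 ++ [8], st.2 ++ [10])
      else if 16 ≤ i ∧ i < 20 then (st.1 ++ [16], st.2 ++ [5])
      else if 20 ≤ i ∧ i < 24 then (st.1 ++ [32], st.2 ++ [1])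
      else if 24 ≤ i ∧ i < 28 then (st.1 ++ [32], st.2 ++ [1])
      else if 28 ≤ i ∧ i < 32 then (st.1 ++ [16], st.2 ++ [5])
      else if 32 ≤ i ∧ i < 36 then (st.1 ++ [8], st.2 ++ [10])
      else if 36 ≤ i ∧ i < 40 then (st.1 ++ [4], st.2 ++ [15])
      else if 40 ≤ i ∧ i < 44 then (st.1 ++ [2], st.2 ++ [20])
      else if 44 ≤ i ∧ i < 48 then (st.1 ++ [1], st.2 ++ [25])
      else (st.1 ++ [1], st.2 ++ [25])) ([], [])

-- ===== PORT B =====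
def pvPat : List (Int × Int) :=
  [(1, 25), (2, 20), (4, 15), (8, 10), (16, 5), (32, 1),
   (32, 1), (16, 5), (8, 10), (4, 15), (2, 20), (1, 25)]

def initialize_latency_bandwidth_alt (model_name : String) : List Int × List Int :=
  let tb : Int × Int := if model_name == "resnet50" then (101, 8) else (51, 4)
  (PySem.List.enumerate pvPat).foldl (fun (st : List Int × List Int) klb =>
    let n : Int := if klb.1 < 11 then tb.2 else tb.1 - 11 * tb.2
    (st.1 ++ List.replicate n.toNat klb.2.1, st.2 ++ List.replicate n.toNat klb.2.2))
    ([], [])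

-- ===== PRECONDITION & SPEC =====
def Spec_initialize_latency_bandwidth (model_name : String) (out : List Int × List Int) : Prop := out = initialize_latency_bandwidth_alt model_name
instance (model_name : String) (out : List Int × List Int) : Decidable (Spec_initialize_latency_bandwidth model_name out) := by unfold Spec_initialize_latency_bandwidth; infer_instance

-- ===== CLAIM (what is proved, stated in full; the proofs are below) =====
def Claim_equal_initialize_latency_bandwidth : Prop := ∀ (model_name : String), Dom_initialize_latency_bandwidth model_name → Spec_initialize_latency_bandwidth model_name (initialize_latency_bandwidth model_name)

-- ===== LEMMAS AND PROOFS =====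

-- ===== VERDICT (by name: the statement is the Claim_ definition above) =====
set_option maxRecDepth 4000 in
theorem initialize_latency_bandwidth_spec : Claim_equal_initialize_latency_bandwidth := by
  intro m _
  unfold Spec_initialize_latency_bandwidth initialize_latency_bandwidth initialize_latency_bandwidth_alt
  by_cases h : m == "resnet50" <;> simp only [h, Bool.false_eq_true, if_false, if_true] <;> decide
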